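-- pv_equiv track=rewrite | github.com/wanghaoqing/EnsemblePDB | EnsemblePDB/refine/check_chains.py | check_group_members
-- ===== SOURCE A (Python) =====
-- def check_group_members(row):
--     lengths = [len(x) for x in row]
--     status = False
--     for i, leng in enumerate(lengths):
--         if i < len(lengths) - 1:
--             if leng != lengths[i+1]:
--                 status = True
--     return status
-- ===== SOURCE B (Python) =====
-- def check_group_members(row):
--     return len({len(x) for x in row}) > 1
-- ===== Notes on version B (the rewrite author's own statement) =====
-- stated objective: simpler
-- what changed: Replaces the indexed enumerate loop with adjacent-element comparisons by a one-line set comprehension of the lengths, returning whether more than one distinct length occurs.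
import Mathlib
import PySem

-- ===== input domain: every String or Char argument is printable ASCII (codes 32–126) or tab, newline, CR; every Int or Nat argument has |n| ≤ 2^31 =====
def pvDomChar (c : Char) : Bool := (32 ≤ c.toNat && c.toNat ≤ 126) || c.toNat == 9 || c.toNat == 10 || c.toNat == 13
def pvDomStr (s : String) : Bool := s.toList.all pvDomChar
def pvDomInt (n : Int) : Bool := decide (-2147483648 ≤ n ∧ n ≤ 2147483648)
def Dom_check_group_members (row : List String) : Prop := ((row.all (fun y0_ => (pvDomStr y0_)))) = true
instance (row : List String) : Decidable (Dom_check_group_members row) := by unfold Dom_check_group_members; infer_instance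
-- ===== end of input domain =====

-- B replaces A's enumerate loop comparing adjacent lengths by "more than one distinct length" via a set; objective: simpler.

-- ===== PORT A =====
def check_group_members (row : List String) : Bool :=
  let lengths : List Int := row.map PySem.Str.len
  (PySem.List.enumerate lengths 0).foldl
    (fun status p =>
      if p.1 < (lengths.length : Int) - 1 then
        if p.2 ≠ PySem.List.pyGetD lengths (p.1 + 1) 0 then true else status
      else status) false

-- ===== PORT B =====
def check_group_members_alt (row : List String) : Bool :=
  decide (1 < (PySem.Set.ofList (row.map PySem.Str.len)).length)

-- ===== PRECONDITION & SPEC =====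
def Spec_check_group_members (row : List String) (out : Bool) : Prop := out = check_group_members_alt row
instance (row : List String) (out : Bool) : Decidable (Spec_check_group_members row out) := by unfold Spec_check_group_members; infer_instance

-- ===== CLAIM (what is proved, stated in full; the proofs are below) =====
def Claim_equal_check_group_members : Prop := ∀ (row : List String), Dom_check_group_members row → Spec_check_group_members row (check_group_members row)

-- ===== LEMMAS AND PROOFS =====

-- If every adjacent pair of ls is equal, every element equals ls[0].
lemma all_eq_head_of_adjacent_eq (ls : List Int)
    (h : ∀ k : Nat, k + 1 < ls.length → ls[k]? = ls[k+1]?) :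
    ∀ i : Nat, i < ls.length → ls[i]? = ls[0]? := by
  intro i
  induction i with
  | zero => intro _; rfl
  | succ n ih =>
    intro hlt
    have := h n hlt
    rw [← this]
    exact ih (by omega)

-- The two characterisations coincide: some adjacent pair differs iff two members differ.
lemma adjacent_iff_pair (ls : List Int) :
    (∃ k : Nat, k + 1 < ls.length ∧ ls[k]? ≠ ls[k+1]?) ↔ (∃ x ∈ ls, ∃ y ∈ ls, x ≠ y) := by
  constructor
  · rintro ⟨k, hk, hne⟩
    have h1 : k < ls.length := by omega
    refine ⟨ls[k], List.getElem_mem h1, ls[k+1], List.getElem_mem hk, ?_⟩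
    intro h
    apply hne
    rw [List.getElem?_eq_getElem h1, List.getElem?_eq_getElem hk, h]
  · rintro ⟨x, hx, y, hy, hne⟩
    by_contra hno
    push_neg at hno
    have hadj : ∀ k : Nat, k + 1 < ls.length → ls[k]? = ls[k+1]? := by
      intro k hk
      exact not_not.mp (fun hne2 => hne2 (hno k hk))
    obtain ⟨i, hi, rfl⟩ := List.mem_iff_getElem.mp hx
    obtain ⟨j, hj, rfl⟩ := List.mem_iff_getElem.mp hy
    apply hne
    have h1 := all_eq_head_of_adjacent_eq ls hadj i hi
    have h2 := all_eq_head_of_adjacent_eq ls hadj j hj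
    rw [List.getElem?_eq_getElem hi] at h1
    rw [List.getElem?_eq_getElem hj] at h2
    exact Option.some.inj (h1.trans h2.symm)

-- Set.ofList has length > 1 iff two members of the list differ.
lemma set_len_gt_one_iff (ls : List Int) :
    1 < (PySem.Set.ofList ls).length ↔ ∃ x ∈ ls, ∃ y ∈ ls, x ≠ y := by
  constructor
  · intro h
    have hnd : (PySem.Set.ofList ls).Nodup := PySem.Set.nodup_ofList ls
    rcases hS : PySem.Set.ofList ls with _ | ⟨a, t⟩
    · rw [hS] at h; simp at h
    · rcases t with _ | ⟨b, t⟩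
      · rw [hS] at h; simp at h
      · rw [hS] at hnd
        have hab : a ≠ b := by
          simp [List.nodup_cons] at hnd; tauto
        have ha : a ∈ ls := by
          have h1 : a ∈ PySem.Set.ofList ls := by rw [hS]; simp
          simpa [PySem.Set.mem_ofList] using h1
        have hb : b ∈ ls := by
          have h1 : b ∈ PySem.Set.ofList ls := by rw [hS]; simp
          simpa [PySem.Set.mem_ofList] using h1
        exact ⟨a, ha, b, hb, hab⟩
  · rintro ⟨x, hx, y, hy, hne⟩
    by_contra hle
    push_neg at hle
    have hx' : x ∈ PySem.Set.ofList ls := by simpa [PySem.Set.mem_ofList] using hx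
    have hy' : y ∈ PySem.Set.ofList ls := by simpa [PySem.Set.mem_ofList] using hy
    rcases hS : PySem.Set.ofList ls with _ | ⟨a, t⟩
    · rw [hS] at hx'; simp at hx'
    · rw [hS] at hle hx' hy'
      have ht : t = [] := by
        have h2 : t.length + 1 ≤ 1 := by simpa using hle
        exact List.eq_nil_of_length_eq_zero (by omega)
      subst ht
      simp at hx' hy'
      exact hne (hx'.trans hy'.symm)

-- A's fold is true exactly when some adjacent pair of lengths differs.
lemma portA_iff (ls : List Int) :
    ((PySem.List.enumerate ls 0).foldl
      (fun status p =>
        if p.1 < (ls.length : Int) - 1 then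
          if p.2 ≠ PySem.List.pyGetD ls (p.1 + 1) 0 then true else status
        else status) false = true)
    ↔ ∃ k : Nat, k + 1 < ls.length ∧ ls[k]? ≠ ls[k+1]? := by
  have hstep : (PySem.List.enumerate ls 0).foldl
      (fun status p =>
        if p.1 < (ls.length : Int) - 1 then
          if p.2 ≠ PySem.List.pyGetD ls (p.1 + 1) 0 then true else status
        else status) false
    = (PySem.List.enumerate ls 0).foldl
      (fun status p =>
        if (decide (p.1 < (ls.length : Int) - 1) && decide (p.2 ≠ PySem.List.pyGetD ls (p.1 + 1) 0)) then true else status) false := by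
    apply PySem.List.foldl_congr_mem
    intro acc p _
    by_cases h1 : p.1 < (ls.length : Int) - 1 <;>
      by_cases h2 : p.2 ≠ PySem.List.pyGetD ls (p.1 + 1) 0 <;>
      simp [h1, h2]
  rw [hstep, PySem.List.foldl_if_true_eq, Bool.false_or, List.any_eq_true]
  constructor
  · rintro ⟨p, hp, hcond⟩
    rw [PySem.List.mem_enumerate_iff] at hp
    obtain ⟨k, hk, rfl⟩ := hp
    simp only [Bool.and_eq_true, decide_eq_true_iff] at hcond
    obtain ⟨h1, h2⟩ := hcond
    have hk1 : k + 1 < ls.length := by omega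
    refine ⟨k, hk1, ?_⟩
    have hget : PySem.List.pyGetD ls ((0:Int) + (k:Int) + 1) 0 = ls[k+1]'hk1 := by
      have hcast : ((0:Int) + (k:Int) + 1) = ((k+1 : Nat) : Int) := by push_cast; ring
      rw [hcast, PySem.List.pyGetD_natCast]
      simp [List.getD, List.getElem?_eq_getElem hk1]
    rw [List.getElem?_eq_getElem (by omega : k < ls.length), List.getElem?_eq_getElem hk1]
    intro hcontra
    apply h2
    rw [hget]
    exact Option.some.inj hcontra
  · rintro ⟨k, hk, hne⟩
    have hklt : k < ls.length := by omega
    refine ⟨((0:Int) + k, ls[k]'hklt), by rw [PySem.List.mem_enumerate_iff]; exact ⟨k, hklt, rfl⟩, ?_⟩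
    simp only [Bool.and_eq_true, decide_eq_true_iff]
    constructor
    · omega
    · have hget : PySem.List.pyGetD ls ((0:Int) + (k:Int) + 1) 0 = ls[k+1]'hk := by
        have hcast : ((0:Int) + (k:Int) + 1) = ((k+1 : Nat) : Int) := by push_cast; ring
        rw [hcast, PySem.List.pyGetD_natCast]
        simp [List.getD, List.getElem?_eq_getElem hk]
      rw [hget]
      intro hcontra
      apply hne
      rw [List.getElem?_eq_getElem hklt, List.getElem?_eq_getElem hk, hcontra]

-- ===== VERDICT (by name: the statement is the Claim_ definition above) =====
theorem check_group_members_spec : Claim_equal_check_group_members := by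
  intro row _
  unfold Spec_check_group_members
  simp only [check_group_members, check_group_members_alt]
  rw [Bool.eq_iff_iff, portA_iff, decide_eq_true_iff, adjacent_iff_pair]
  exact (set_len_gt_one_iff _).symm
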